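-- pv_equiv track=rewrite | github.com/gabriellaec/desoft-analise-exercicios | backup/user_081/ch178_2020_08_14_14_30_35_873780.py | junta_nomes
-- ===== SOURCE A (Python) =====
-- def junta_nomes(x,y,z):
--     lista = []
--     for i in x:
--         for j in z:
--             nova = i + ' '+j
--             if nova not in lista:
--                 lista.append(nova)
--         break
--     for k in y:
--         for l in z:
--             nova1 = k + ' '+l
--             if nova1 not in lista:
--                 lista.append(nova1)
--         break
--     return(lista)
-- ===== SOURCE B (Python) =====
-- def junta_nomes(x, y, z):
--     nomes = [p + ' ' + i for p in list(x)[:1] + list(y)[:1] for i in z]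
--     # head-and-filter dedup: take the head, delete all its later copies, repeat
--     out = []
--     while nomes:
--         h = nomes[0]
--         out.append(h)
--         nomes = [s for s in nomes[1:] if s != h]
--     return out
-- ===== Notes on version B (the rewrite author's own statement) =====
-- stated objective: alternative
-- what changed: B first builds every concatenation of the first elements of x and y with z unconditionally, then deduplicates with a recursive head-and-filter pass (keep head, delete its later copies, recurse), instead of A's incremental append guarded by a membership test against the output built so far.
import Mathlib
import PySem

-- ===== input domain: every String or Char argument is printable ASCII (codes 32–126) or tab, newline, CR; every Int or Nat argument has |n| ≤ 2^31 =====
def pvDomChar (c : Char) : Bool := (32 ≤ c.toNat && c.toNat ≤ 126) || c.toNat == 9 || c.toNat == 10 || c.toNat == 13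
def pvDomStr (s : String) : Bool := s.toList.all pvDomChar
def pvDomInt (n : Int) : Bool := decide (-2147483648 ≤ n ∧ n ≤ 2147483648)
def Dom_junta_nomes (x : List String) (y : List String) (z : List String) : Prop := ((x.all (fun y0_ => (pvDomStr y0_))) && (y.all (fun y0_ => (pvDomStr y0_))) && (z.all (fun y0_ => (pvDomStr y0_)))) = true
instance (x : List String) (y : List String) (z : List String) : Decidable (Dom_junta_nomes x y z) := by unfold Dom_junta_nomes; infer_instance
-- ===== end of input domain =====

-- B builds all concatenations unconditionally and deduplicates with a recursive
-- head-and-filter pass, replacing A's membership-guarded incremental append; same values.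

-- ===== PORT A =====
-- inner 'for j in z' loop of A: conditional dedup-append into lista
def jnInnerA (pre : String) (z : List String) (lista : List String) : List String :=
  z.foldl (fun acc j =>
    let nova := pre ++ " " ++ j
    if nova ∈ acc then acc else acc ++ [nova]) lista

def junta_nomes (x : List String) (y : List String) (z : List String) : List String :=
  let lista : List String := []
  -- 'for i in x: …; break' runs the inner loop for the first element only
  let lista := match x with
    | [] => lista
    | i :: _ => jnInnerA i z lista
  -- 'for k in y: …; break'
  match y with
  | [] => lista
  | k :: _ => jnInnerA k z lista

-- ===== PORT B =====
-- recursive dedup: keep the head, drop its later copies, recurse on the rest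
def jnDedup : List String → List String
  | [] => []
  | h :: t => h :: jnDedup (t.filter (fun s => s ≠ h))
termination_by l => l.length
decreasing_by
  simp only [List.length_unattach, List.length_cons]
  exact Nat.lt_succ_of_le ((List.length_filter_le _ _).trans (by simp))

def junta_nomes_alt (x : List String) (y : List String) (z : List String) : List String :=
  let nomes := (x.take 1 ++ y.take 1).flatMap (fun p => z.map (fun i => p ++ " " ++ i))
  jnDedup nomes

-- ===== PRECONDITION & SPEC =====
def Spec_junta_nomes (x : List String) (y : List String) (z : List String) (out : List String) : Prop := out = junta_nomes_alt x y z
instance (x : List String) (y : List String) (z : List String) (out : List String) : Decidable (Spec_junta_nomes x y z out) := by unfold Spec_junta_nomes; infer_instance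

-- ===== CLAIM (what is proved, stated in full; the proofs are below) =====
def Claim_equal_junta_nomes : Prop := ∀ (x : List String) (y : List String) (z : List String), Dom_junta_nomes x y z → Spec_junta_nomes x y z (junta_nomes x y z)

-- ===== LEMMAS AND PROOFS =====

-- A's dedup step, abstracted
def jnStep (acc : List String) (s : String) : List String :=
  if s ∈ acc then acc else acc ++ [s]

lemma jnInnerA_eq_foldl_map (pre : String) (z : List String) (lista : List String) :
    jnInnerA pre z lista = (z.map (fun j => pre ++ " " ++ j)).foldl jnStep lista := by
  induction z generalizing lista with
  | nil => rfl
  | cons j zs ih => simp [jnInnerA, jnStep] at *; exact ih _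

lemma jnDedup_nil : jnDedup [] = [] := by
  simp only [jnDedup]

lemma jnDedup_cons (h : String) (t : List String) :
    jnDedup (h :: t) = h :: jnDedup (t.filter (fun s => s ≠ h)) := by
  simp only [jnDedup]

-- A's incremental dedup equals B's filter-based recursive dedup (relative to an accumulator)
lemma jnFoldl_eq_dedup (l acc : List String) :
    l.foldl jnStep acc = acc ++ jnDedup (l.filter (fun s => s ∉ acc)) := by
  induction l generalizing acc with
  | nil => simp [jnDedup_nil]
  | cons h t ih =>
    by_cases hmem : h ∈ acc
    · simpa [List.foldl, jnStep, hmem] using ih acc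
    · have : (h :: t).filter (fun s => s ∉ acc)
          = h :: t.filter (fun s => s ∉ acc) := by simp [hmem]
      rw [this, jnDedup_cons, List.filter_filter]
      have harg : t.filter (fun s => decide (s ≠ h) && decide (s ∉ acc))
          = t.filter (fun s => s ∉ acc ++ [h]) := by
        apply List.filter_congr
        intro s _
        simp [List.mem_append]
        exact Bool.and_comm _ _
      simp only [List.foldl, jnStep, if_neg hmem, ih (acc ++ [h]), harg]
      simp

-- ===== VERDICT (by name: the statement is the Claim_ definition above) =====
theorem junta_nomes_spec : Claim_equal_junta_nomes := by
  intro x y z _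
  show junta_nomes x y z = junta_nomes_alt x y z
  have key : ∀ l : List String, l.foldl jnStep [] = jnDedup l := by
    intro l; simpa using jnFoldl_eq_dedup l []
  cases x <;> cases y <;>
    simp [junta_nomes, junta_nomes_alt, jnInnerA_eq_foldl_map, List.foldl_append, ← key]
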